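-- pv_equiv track=rewrite | github.com/mohammadfaiizan/ProjectI | DSA/Problem/Dynamic Programming/13_Advanced_Patterns/1187_Make_Array_Strictly_Increasing.py | make_array_strictly_increasing_basic_dp
-- ===== SOURCE A (Python) =====
-- def make_array_strictly_increasing_basic_dp(arr1, arr2):
--     """
--     BASIC DP APPROACH:
--     =================
--     Use DP with state (position, last_value) to track minimum operations.
--
--     Time Complexity: O(n * m * n) - where n = len(arr1), m = len(arr2)
--     Space Complexity: O(n * unique_values) - DP state space
--     """
--     import bisect
--
--     n = len(arr1)
--     arr2_sorted = sorted(set(arr2))  # Remove duplicates and sort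
--
--     # dp[i][val] = minimum operations to make arr1[0:i] strictly increasing with arr1[i-1] = val
--     # Use dict for sparse representation
--     dp = {}
--
--     def solve(pos, last_val):
--         if pos == n:
--             return 0
--
--         if (pos, last_val) in dp:
--             return dp[(pos, last_val)]
--
--         result = float('inf')
--
--         # Option 1: Keep arr1[pos] if it's greater than last_val
--         if arr1[pos] > last_val:
--             result = min(result, solve(pos + 1, arr1[pos]))
--
--         # Option 2: Replace arr1[pos] with some value from arr2
--         # Find the smallest value in arr2 that is greater than last_val
--         idx = bisect.bisect_right(arr2_sorted, last_val)
--
--         for k in range(idx, len(arr2_sorted)):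
--             if arr2_sorted[k] > last_val:
--                 result = min(result, 1 + solve(pos + 1, arr2_sorted[k]))
--
--         dp[(pos, last_val)] = result
--         return result
--
--     result = solve(0, -1)
--     return result if result != float('inf') else -1
-- ===== SOURCE B (Python) =====
-- def make_array_strictly_increasing_basic_dp(arr1, arr2):
--     """Forward DP over a dict {last_value: min_ops}; at each element only the
--     smallest arr2 value greater than the running last value is tried (larger
--     replacements are dominated), so the inner scan of A disappears."""
--     import bisect
--
--     a2 = sorted(set(arr2))
--     states = {-1: 0}
--     for x in arr1:
--         new = {}
--         for last, cost in states.items():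
--             if x > last:
--                 if x not in new or cost < new[x]:
--                     new[x] = cost
--             j = bisect.bisect_right(a2, last)
--             if j < len(a2):
--                 v = a2[j]
--                 if v not in new or cost + 1 < new[v]:
--                     new[v] = cost + 1
--         states = new
--     return min(states.values()) if states else -1
-- ===== Notes on version B (the rewrite author's own statement) =====
-- stated objective: faster
-- what changed: Replaced the top-down memoized recursion that tries every arr2 value above the last kept value with an iterative forward DP over a dict {last_value: min_ops}, trying at each element only the single smallest arr2 value greater than last (larger replacements are dominated by monotonicity), which removes the inner scan over arr2.
import Mathlib
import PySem

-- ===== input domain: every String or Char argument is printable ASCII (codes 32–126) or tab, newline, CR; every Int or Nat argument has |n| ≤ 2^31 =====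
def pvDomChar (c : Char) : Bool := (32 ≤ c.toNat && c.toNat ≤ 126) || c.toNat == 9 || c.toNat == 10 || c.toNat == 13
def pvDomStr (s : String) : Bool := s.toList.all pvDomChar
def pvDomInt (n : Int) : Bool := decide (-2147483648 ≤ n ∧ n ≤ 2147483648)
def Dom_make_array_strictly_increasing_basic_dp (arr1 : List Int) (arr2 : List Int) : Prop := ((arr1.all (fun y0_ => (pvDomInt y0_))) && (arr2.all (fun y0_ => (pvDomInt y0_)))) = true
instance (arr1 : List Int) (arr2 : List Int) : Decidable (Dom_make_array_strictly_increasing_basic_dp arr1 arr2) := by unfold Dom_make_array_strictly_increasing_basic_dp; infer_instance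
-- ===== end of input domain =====

-- B replaces A's memoized top-down recursion (which tries EVERY arr2 value above the last kept
-- value) by an iterative forward DP over a dict {last_value: min_ops} that tries only the single
-- smallest arr2 value above last (larger replacements are dominated); objective: faster.

-- ===== PORT A =====
-- arr1[pos] for pos = len(arr1) - (fuel+1)
def pvX (arr1 : List Int) (fuel : Nat) : Int := arr1.getD (arr1.length - (fuel+1)) 0

-- min with 'none' playing float('inf')  (result = min(result, …) in A)
def pvInfMin : Option Int → Option Int → Option Int
  | none, b => b
  | some a, none => some a
  | some a, some b => some (min a b)

-- solve(pos, last_val) of A, with the memo dict dp threaded through; fuel = n - pos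
def pvSolveA (arr1 : List Int) (a2s : List Int) :
    Nat → Int → PySem.Dict (Int × Int) (Option Int) →
      Option Int × PySem.Dict (Int × Int) (Option Int)
  | 0, _last, dp => (some 0, dp)
  | fuel+1, last, dp =>
    match dp.get? (((arr1.length - (fuel+1) : Nat) : Int), last) with
    | some v => (v, dp)
    | none =>
      let p1 : Option Int × PySem.Dict (Int × Int) (Option Int) :=
        if last < pvX arr1 fuel then
          let q := pvSolveA arr1 a2s fuel (pvX arr1 fuel) dp
          (pvInfMin none q.1, q.2)
        else (none, dp)
      let p2 :=
        (a2s.drop (PySem.List.bisectRight a2s last)).foldl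
          (fun acc v =>
            if last < v then
              let q := pvSolveA arr1 a2s fuel v acc.2
              (pvInfMin acc.1 (q.1.map (fun t => 1 + t)), q.2)
            else acc)
          p1
      (p2.1, p2.2.insert (((arr1.length - (fuel+1) : Nat) : Int), last) p2.1)

def make_array_strictly_increasing_basic_dp (arr1 : List Int) (arr2 : List Int) : Int :=
  match (pvSolveA arr1 (PySem.List.sorted (PySem.Set.ofList arr2) (fun x => x) false)
      arr1.length (-1) PySem.Dict.empty).1 with
  | some v => v
  | none => -1

-- ===== PORT B =====
-- if k not in d or c < d[k]: d[k] = c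
def pvUpdMin (d : PySem.Dict Int Int) (k c : Int) : PySem.Dict Int Int :=
  match d.get? k with
  | none => d.insert k c
  | some c' => if c < c' then d.insert k c else d

-- one element x of arr1: rebuild the state dict {last: min_ops}
def pvStepB (a2s : List Int) (states : PySem.Dict Int Int) (x : Int) : PySem.Dict Int Int :=
  states.items.foldl
    (fun new lc =>
      let new1 := if lc.1 < x then pvUpdMin new x lc.2 else new
      (a2s[PySem.List.bisectRight a2s lc.1]?).elim new1 (fun v => pvUpdMin new1 v (lc.2 + 1)))
    PySem.Dict.empty

def make_array_strictly_increasing_basic_dp_alt (arr1 : List Int) (arr2 : List Int) : Int :=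
  match PySem.List.min?
      ((arr1.foldl (pvStepB (PySem.List.sorted (PySem.Set.ofList arr2) (fun x => x) false))
        (PySem.Dict.empty.insert (-1) 0)).values) (fun y => y) with
  | some m => m
  | none => -1

-- ===== PRECONDITION & SPEC =====
def Spec_make_array_strictly_increasing_basic_dp (arr1 : List Int) (arr2 : List Int) (out : Int) : Prop := out = make_array_strictly_increasing_basic_dp_alt arr1 arr2
instance (arr1 : List Int) (arr2 : List Int) (out : Int) : Decidable (Spec_make_array_strictly_increasing_basic_dp arr1 arr2 out) := by unfold Spec_make_array_strictly_increasing_basic_dp; infer_instance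

-- ===== CLAIM (what is proved, stated in full; the proofs are below) =====
def Claim_equal_make_array_strictly_increasing_basic_dp : Prop := ∀ (arr1 : List Int) (arr2 : List Int), Dom_make_array_strictly_increasing_basic_dp arr1 arr2 → Spec_make_array_strictly_increasing_basic_dp arr1 arr2 (make_array_strictly_increasing_basic_dp arr1 arr2)

-- ===== LEMMAS AND PROOFS =====

-- plain (memo-free) value of A's recursion
def pvFA (arr1 : List Int) (a2s : List Int) : Nat → Int → Option Int
  | 0, _ => some 0
  | fuel+1, last =>
    (a2s.drop (PySem.List.bisectRight a2s last)).foldl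
      (fun r v => if last < v then pvInfMin r ((pvFA arr1 a2s fuel v).map (fun t => 1 + t)) else r)
      (if last < pvX arr1 fuel then pvFA arr1 a2s fuel (pvX arr1 fuel) else none)

-- pruned recursion: only the smallest arr2 value above last is tried (B's transition)
def pvGB (arr1 : List Int) (a2s : List Int) : Nat → Int → Option Int
  | 0, _ => some 0
  | fuel+1, last =>
    pvInfMin (if last < pvX arr1 fuel then pvGB arr1 a2s fuel (pvX arr1 fuel) else none)
      ((a2s[PySem.List.bisectRight a2s last]?).elim none
        (fun v => (pvGB arr1 a2s fuel v).map (fun t => 1 + t)))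

-- order on Option Int with none = +infinity
def pvOle (a b : Option Int) : Prop := ∀ y, b = some y → ∃ x, a = some x ∧ x ≤ y

@[simp] lemma pvInfMin_none_left (b : Option Int) : pvInfMin none b = b := rfl
@[simp] lemma pvInfMin_none_right (a : Option Int) : pvInfMin a none = a := by cases a <;> rfl
lemma pvInfMin_comm (a b : Option Int) : pvInfMin a b = pvInfMin b a := by
  cases a <;> cases b <;> simp [pvInfMin, min_comm]
lemma pvInfMin_assoc (a b c : Option Int) :
    pvInfMin (pvInfMin a b) c = pvInfMin a (pvInfMin b c) := by
  cases a <;> cases b <;> cases c <;> simp [pvInfMin, min_assoc]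

lemma pvOle_refl (a : Option Int) : pvOle a a := fun y h => ⟨y, h, le_refl y⟩
lemma pvOle_none_right (a : Option Int) : pvOle a none := fun y h => by cases h
lemma pvOle_trans {a b c : Option Int} (h1 : pvOle a b) (h2 : pvOle b c) : pvOle a c := by
  intro y hy
  obtain ⟨z, hz, hzy⟩ := h2 y hy
  obtain ⟨w, hw, hwz⟩ := h1 z hz
  exact ⟨w, hw, le_trans hwz hzy⟩
lemma pvOle_infMin_left (a b : Option Int) : pvOle (pvInfMin a b) a := by
  intro y hy
  cases a with
  | none => cases hy
  | some av =>
    cases b with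
    | none => exact ⟨y, hy, le_refl y⟩
    | some bv =>
      simp at hy
      exact ⟨min av bv, by simp [pvInfMin], by omega⟩
lemma pvOle_infMin_right (a b : Option Int) : pvOle (pvInfMin a b) b := by
  rw [pvInfMin_comm]; exact pvOle_infMin_left b a
lemma pvOle_infMin_of {c a b : Option Int} (h1 : pvOle c a) (h2 : pvOle c b) :
    pvOle c (pvInfMin a b) := by
  intro y hy
  cases a with
  | none => exact h2 y (by simpa using hy)
  | some av =>
    cases b with
    | none => exact h1 y (by simpa using hy)
    | some bv =>
      simp [pvInfMin] at hy
      rcases min_cases av bv with ⟨hm, hle⟩ | ⟨hm, hle⟩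
      · obtain ⟨w, hw, hwz⟩ := h1 av rfl
        exact ⟨w, hw, by omega⟩
      · obtain ⟨w, hw, hwz⟩ := h2 bv rfl
        exact ⟨w, hw, by omega⟩
lemma pvInfMin_mono {a a' b b' : Option Int} (h1 : pvOle a a') (h2 : pvOle b b') :
    pvOle (pvInfMin a b) (pvInfMin a' b') := by
  apply pvOle_infMin_of
  · exact pvOle_trans (pvOle_infMin_left a b) h1
  · exact pvOle_trans (pvOle_infMin_right a b) h2
lemma pvInfMin_eq_left {a b : Option Int} (h : pvOle a b) : pvInfMin a b = a := by
  cases a with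
  | none =>
    cases b with
    | none => rfl
    | some bv => obtain ⟨w, hw, _⟩ := h bv rfl; cases hw
  | some av =>
    cases b with
    | none => rfl
    | some bv =>
      obtain ⟨w, hw, hwb⟩ := h bv rfl
      simp at hw
      simp [pvInfMin]
      omega
lemma pvOle_map_add {a b : Option Int} (c : Int) (h : pvOle a b) :
    pvOle (a.map (fun t => c + t)) (b.map (fun t => c + t)) := by
  intro y hy
  cases b with
  | none => cases hy
  | some bv =>
    simp at hy
    obtain ⟨w, hw, hwb⟩ := h bv rfl
    exact ⟨c + w, by simp [hw], by omega⟩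
lemma pvOle_map_add_of_le (c c' : Int) (hcc : c ≤ c') (a : Option Int) :
    pvOle (a.map (fun t => c + t)) (a.map (fun t => c' + t)) := by
  intro y hy
  cases a with
  | none => cases hy
  | some av => exact ⟨c + av, by simp, by simp at hy; omega⟩

-- minimum of a list of Option Int (none = +infinity)
def pvMinList : List (Option Int) → Option Int
  | [] => none
  | a :: t => pvInfMin a (pvMinList t)

lemma foldl_infMin_filter (g : Int → Option Int) (c : Int) :
    ∀ (l : List Int) (r0 : Option Int),
      l.foldl (fun r v => if c < v then pvInfMin r (g v) else r) r0
        = pvInfMin r0 (pvMinList ((l.filter (fun v => decide (c < v))).map g)) := by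
  intro l
  induction l with
  | nil => intro r0; simp [pvMinList]
  | cons v t ih =>
    intro r0
    by_cases h : c < v
    · simp only [List.foldl_cons]
      rw [if_pos h, ih, List.filter_cons_of_pos (by simp [h]), List.map_cons]
      show pvInfMin (pvInfMin r0 (g v)) _ = pvInfMin r0 (pvInfMin (g v) _)
      rw [pvInfMin_assoc]
    · simp only [List.foldl_cons]
      rw [if_neg h, ih, List.filter_cons_of_neg (by simp [h])]

lemma pvOle_minList_mem {a : Option Int} {S : List (Option Int)} (h : a ∈ S) :
    pvOle (pvMinList S) a := by
  induction S with
  | nil => cases h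
  | cons b t ih =>
    rcases List.mem_cons.mp h with rfl | h'
    · exact pvOle_infMin_left _ _
    · exact pvOle_trans (pvOle_infMin_right _ _) (ih h')

lemma pvOle_minList_of_forall {a : Option Int} {S : List (Option Int)}
    (h : ∀ b ∈ S, pvOle a b) : pvOle a (pvMinList S) := by
  induction S with
  | nil => exact pvOle_none_right a
  | cons b t ih =>
    exact pvOle_infMin_of (h b (by simp)) (ih (fun x hx => h x (by simp [hx])))

lemma pvOle_minList_sublist {t s : List (Option Int)} (h : t.Sublist s) :
    pvOle (pvMinList s) (pvMinList t) := by
  induction h with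
  | slnil => exact pvOle_refl _
  | cons a _ ih => exact pvOle_trans (pvOle_infMin_right _ _) ih
  | cons₂ a _ ih => exact pvInfMin_mono (pvOle_refl _) ih

-- bisect_right on a sorted list: everything before is ≤ l, everything after is > l
lemma pvTake_le (a2s : List Int) (hs : a2s.Pairwise (· ≤ ·)) (l : Int) :
    ∀ v ∈ a2s.take (PySem.List.bisectRight a2s l), v ≤ l := by
  intro v hv
  obtain ⟨j, hj, hvj⟩ := List.mem_iff_getElem.mp hv
  have hjlen : j < a2s.length := by simp [List.length_take] at hj; omega
  have hjidx : j < PySem.List.bisectRight a2s l := by simp [List.length_take] at hj; omega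
  have h := (PySem.List.bisectRight_spec a2s l hs).2.1 j hjlen hjidx
  rw [List.getElem_take] at hvj
  subst hvj
  exact h

lemma pvDrop_gt (a2s : List Int) (hs : a2s.Pairwise (· ≤ ·)) (l : Int) :
    ∀ v ∈ a2s.drop (PySem.List.bisectRight a2s l), l < v := by
  intro v hv
  obtain ⟨j, hj, hvj⟩ := List.mem_iff_getElem.mp hv
  rw [List.getElem_drop] at hvj
  have hjlen : PySem.List.bisectRight a2s l + j < a2s.length := by
    simp [List.length_drop] at hj; omega
  have h := (PySem.List.bisectRight_spec a2s l hs).2.2 _ hjlen (by omega)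
  subst hvj
  exact h

lemma pvDrop_filter_eq (a2s : List Int) (hs : a2s.Pairwise (· ≤ ·)) (l : Int) :
    (a2s.drop (PySem.List.bisectRight a2s l)).filter (fun v => decide (l < v))
      = a2s.drop (PySem.List.bisectRight a2s l) := by
  rw [List.filter_eq_self]
  intro v hv
  simpa using pvDrop_gt a2s hs l v hv

lemma pvCand_eq (a2s : List Int) (hs : a2s.Pairwise (· ≤ ·)) (l : Int) :
    (a2s.drop (PySem.List.bisectRight a2s l)).filter (fun v => decide (l < v))
      = a2s.filter (fun v => decide (l < v)) := by
  conv_rhs => rw [← List.take_append_drop (PySem.List.bisectRight a2s l) a2s]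
  rw [List.filter_append]
  have h1 : (a2s.take (PySem.List.bisectRight a2s l)).filter (fun v => decide (l < v)) = [] := by
    rw [List.filter_eq_nil_iff]
    intro v hv
    have := pvTake_le a2s hs l v hv
    simp
    omega
  rw [h1, List.nil_append]

-- monotonicity: a smaller bound on the next value can only help
lemma pvFA_mono (arr1 a2s : List Int) (hs : a2s.Pairwise (· ≤ ·)) (fuel : Nat) :
    ∀ l l' : Int, l ≤ l' → pvOle (pvFA arr1 a2s fuel l) (pvFA arr1 a2s fuel l') := by
  intro l l' hll
  cases fuel with
  | zero => exact pvOle_refl _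
  | succ f =>
    rw [pvFA, pvFA]
    simp only [foldl_infMin_filter]
    rw [pvCand_eq a2s hs l, pvCand_eq a2s hs l']
    apply pvInfMin_mono
    · by_cases h' : l' < pvX arr1 f
      · rw [if_pos h', if_pos (lt_of_le_of_lt hll h')]
        exact pvOle_refl _
      · rw [if_neg h']
        exact pvOle_none_right _
    · apply pvOle_minList_sublist
      apply List.Sublist.map
      have heq : a2s.filter (fun v => decide (l' < v))
          = (a2s.filter (fun v => decide (l < v))).filter (fun v => decide (l' < v)) := by
        rw [List.filter_filter]
        apply List.filter_congr
        intro v _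
        by_cases h : l' < v
        · simp [h, lt_of_le_of_lt hll h]
        · simp [h]
      rw [heq]
      exact List.filter_sublist

-- pruning: with a strictly increasing candidate list only the first candidate matters
lemma pvFA_eq_pvGB (arr1 a2s : List Int) (hs : a2s.Pairwise (· < ·)) :
    ∀ (fuel : Nat) (l : Int), pvFA arr1 a2s fuel l = pvGB arr1 a2s fuel l := by
  have hle : a2s.Pairwise (· ≤ ·) := hs.imp (fun h => le_of_lt h)
  intro fuel
  induction fuel with
  | zero => intro l; rfl
  | succ f ih =>
    intro l
    rw [pvFA, pvGB]
    simp only [foldl_infMin_filter]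
    rw [pvDrop_filter_eq a2s hle l]
    have hkeep : (if l < pvX arr1 f then pvFA arr1 a2s f (pvX arr1 f) else none)
        = (if l < pvX arr1 f then pvGB arr1 a2s f (pvX arr1 f) else none) := by
      split <;> simp [ih]
    rw [hkeep]
    congr 1
    cases hidx : a2s[PySem.List.bisectRight a2s l]? with
    | none =>
      rw [List.drop_eq_nil_of_le (List.getElem?_eq_none_iff.mp hidx)]
      rfl
    | some v =>
      obtain ⟨hlen, hv⟩ := List.getElem?_eq_some_iff.mp hidx
      have hdrop : a2s.drop (PySem.List.bisectRight a2s l)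
          = v :: a2s.drop (PySem.List.bisectRight a2s l + 1) := by
        rw [List.drop_eq_getElem_cons hlen, hv]
      rw [hdrop, List.map_cons]
      have habs : pvOle ((pvFA arr1 a2s f v).map (fun t => 1 + t))
          (pvMinList ((a2s.drop (PySem.List.bisectRight a2s l + 1)).map
            (fun w => (pvFA arr1 a2s f w).map (fun t => 1 + t)))) := by
        apply pvOle_minList_of_forall
        intro b hb
        obtain ⟨w, hw, rfl⟩ := List.mem_map.mp hb
        obtain ⟨j, hj, hwj⟩ := List.mem_iff_getElem.mp hw
        rw [List.getElem_drop] at hwj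
        have hjlen : PySem.List.bisectRight a2s l + 1 + j < a2s.length := by
          simp [List.length_drop] at hj; omega
        have hlt2 := List.pairwise_iff_getElem.mp hs (PySem.List.bisectRight a2s l)
          (PySem.List.bisectRight a2s l + 1 + j) hlen hjlen (by omega)
        rw [hv] at hlt2
        subst hwj
        exact pvOle_map_add 1 (pvFA_mono arr1 a2s hle f _ _ (le_of_lt hlt2))
      show pvInfMin ((pvFA arr1 a2s f v).map (fun t => 1 + t)) _ = _
      rw [pvInfMin_eq_left habs]
      show (pvFA arr1 a2s f v).map (fun t => 1 + t) = (pvGB arr1 a2s f v).map (fun t => 1 + t)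
      rw [ih]

-- ===== A's memoized recursion computes pvFA =====
def pvInv (arr1 a2s : List Int) (dp : PySem.Dict (Int × Int) (Option Int)) : Prop :=
  ∀ (k : Nat) (l : Int) (v : Option Int), k ≤ arr1.length →
    dp.get? (((arr1.length - k : Nat) : Int), l) = some v → v = pvFA arr1 a2s k l

lemma pvInv_insert (arr1 a2s : List Int) (f : Nat) (last : Int)
    (dp : PySem.Dict (Int × Int) (Option Int)) (h : pvInv arr1 a2s dp)
    (hf : f + 1 ≤ arr1.length) :
    pvInv arr1 a2s (dp.insert (((arr1.length - (f+1) : Nat) : Int), last)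
      (pvFA arr1 a2s (f+1) last)) := by
  intro k l v hk hget
  rw [PySem.Dict.get?_insert] at hget
  split at hget
  · rename_i heq
    have h1 : ((arr1.length - k : Nat) : Int) = ((arr1.length - (f+1) : Nat) : Int) :=
      congrArg Prod.fst heq
    have h2 : l = last := congrArg Prod.snd heq
    have hk' : k = f + 1 := by
      have := Nat.cast_inj.mp h1
      omega
    cases hget
    rw [hk', h2]
  · exact h k l v hk hget

lemma pvSolveA_correct (arr1 a2s : List Int) :
    ∀ (fuel : Nat) (last : Int) (dp : PySem.Dict (Int × Int) (Option Int)),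
      fuel ≤ arr1.length → pvInv arr1 a2s dp →
      (pvSolveA arr1 a2s fuel last dp).1 = pvFA arr1 a2s fuel last ∧
        pvInv arr1 a2s (pvSolveA arr1 a2s fuel last dp).2 := by
  intro fuel
  induction fuel with
  | zero =>
    intro last dp _ hinv
    rw [pvSolveA]
    exact ⟨rfl, hinv⟩
  | succ f IH =>
    intro last dp hle hinv
    have hfold : ∀ (l : List Int) (r : Option Int) (dpp : PySem.Dict (Int × Int) (Option Int)),
        pvInv arr1 a2s dpp →
        (l.foldl (fun acc v =>
            if last < v then
              (pvInfMin acc.1 ((pvSolveA arr1 a2s f v acc.2).1.map (fun t => 1 + t)),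
                (pvSolveA arr1 a2s f v acc.2).2)
            else acc) (r, dpp)).1
          = l.foldl (fun r v =>
              if last < v then pvInfMin r ((pvFA arr1 a2s f v).map (fun t => 1 + t)) else r) r ∧
        pvInv arr1 a2s (l.foldl (fun acc v =>
            if last < v then
              (pvInfMin acc.1 ((pvSolveA arr1 a2s f v acc.2).1.map (fun t => 1 + t)),
                (pvSolveA arr1 a2s f v acc.2).2)
            else acc) (r, dpp)).2 := by
      intro l
      induction l with
      | nil => intro r dpp hp; exact ⟨rfl, hp⟩
      | cons v t iht =>
        intro r dpp hp
        by_cases hv : last < v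
        · simp only [List.foldl_cons]
          rw [if_pos hv, if_pos hv]
          obtain ⟨hq1, hq2⟩ := IH v dpp (by omega) hp
          rw [← hq1]
          exact iht _ _ hq2
        · simp only [List.foldl_cons]
          rw [if_neg hv, if_neg hv]
          exact iht r dpp hp
    cases hget : dp.get? (((arr1.length - (f+1) : Nat) : Int), last) with
    | some v =>
      simp only [pvSolveA, hget]
      exact ⟨hinv (f+1) last v hle hget, hinv⟩
    | none =>
      simp only [pvSolveA, hget]
      by_cases hkx : last < pvX arr1 f
      · rw [if_pos hkx]
        obtain ⟨hq1, hq2⟩ := IH (pvX arr1 f) dp (by omega) hinv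
        obtain ⟨hf1, hf2⟩ := hfold (a2s.drop (PySem.List.bisectRight a2s last))
          (pvInfMin none (pvSolveA arr1 a2s f (pvX arr1 f) dp).1)
          ((pvSolveA arr1 a2s f (pvX arr1 f) dp).2) hq2
        have hres : ((a2s.drop (PySem.List.bisectRight a2s last)).foldl (fun acc v =>
            if last < v then
              (pvInfMin acc.1 ((pvSolveA arr1 a2s f v acc.2).1.map (fun t => 1 + t)),
                (pvSolveA arr1 a2s f v acc.2).2)
            else acc) (pvInfMin none (pvSolveA arr1 a2s f (pvX arr1 f) dp).1,
              (pvSolveA arr1 a2s f (pvX arr1 f) dp).2)).1 = pvFA arr1 a2s (f+1) last := by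
          rw [hf1, pvFA, if_pos hkx, pvInfMin_none_left, hq1]
        exact ⟨hres, hres.symm ▸ pvInv_insert arr1 a2s f last _ hf2 hle⟩
      · rw [if_neg hkx]
        obtain ⟨hf1, hf2⟩ := hfold (a2s.drop (PySem.List.bisectRight a2s last)) none dp hinv
        have hres : ((a2s.drop (PySem.List.bisectRight a2s last)).foldl (fun acc v =>
            if last < v then
              (pvInfMin acc.1 ((pvSolveA arr1 a2s f v acc.2).1.map (fun t => 1 + t)),
                (pvSolveA arr1 a2s f v acc.2).2)
            else acc) ((none : Option Int), dp)).1 = pvFA arr1 a2s (f+1) last := by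
          rw [hf1, pvFA, if_neg hkx]
        exact ⟨hres, hres.symm ▸ pvInv_insert arr1 a2s f last _ hf2 hle⟩

-- ===== B's forward DP computes pvGB =====
def pvTerm (arr1 a2s : List Int) (fuel : Nat) (lc : Int × Int) : Option Int :=
  (pvGB arr1 a2s fuel lc.1).map (fun t => lc.2 + t)

def pvVal (arr1 a2s : List Int) (fuel : Nat) (L : List (Int × Int)) : Option Int :=
  pvMinList (L.map (pvTerm arr1 a2s fuel))

def pvContrib (arr1 a2s : List Int) (fuel : Nat) (x : Int) (lc : Int × Int) : Option Int :=
  pvInfMin (if lc.1 < x then (pvGB arr1 a2s fuel x).map (fun t => lc.2 + t) else none)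
    ((a2s[PySem.List.bisectRight a2s lc.1]?).elim none
      (fun v => (pvGB arr1 a2s fuel v).map (fun t => lc.2 + 1 + t)))

-- replacing the (unique) entry at key k by a smaller cost = min'ing in the new pair
lemma pvVal_replace (arr1 a2s : List Int) (fuel : Nat) (k c c' : Int) (hcc : c ≤ c') :
    ∀ (L : List (Int × Int)), (L.map (fun p => p.1)).Nodup → (k, c') ∈ L →
      pvMinList ((L.map (fun p => if p.1 == k then (k, c) else p)).map (pvTerm arr1 a2s fuel))
        = pvInfMin (pvMinList (L.map (pvTerm arr1 a2s fuel))) (pvTerm arr1 a2s fuel (k, c)) := by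
  intro L
  induction L with
  | nil => intro _ hmem; cases hmem
  | cons p t ih =>
    intro hnd hmem
    simp only [List.map_cons, List.nodup_cons] at hnd ⊢
    by_cases hpk : p.1 = k
    · have hkt : k ∉ t.map (fun p => p.1) := by rw [← hpk]; exact hnd.1
      have hp : p = (k, c') := by
        rcases List.mem_cons.mp hmem with h | h
        · exact h.symm
        · exact absurd (List.mem_map.mpr ⟨(k, c'), h, rfl⟩) hkt
      have hrepl : t.map (fun q => if q.1 == k then (k, c) else q) = t := by
        have := List.map_congr_left (l := t)
          (f := fun q => if q.1 == k then (k, c) else q) (g := id) ?_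
        · rw [this, List.map_id]
        · intro q hq
          have hq1 : q.1 ≠ k := fun hq1 => hkt (hq1 ▸ List.mem_map.mpr ⟨q, hq, rfl⟩)
          simp [hq1]
      rw [hrepl]
      have hif : (if p.1 == k then (k, c) else p) = (k, c) := by simp [hpk]
      rw [hif, hp]
      simp only [pvMinList]
      have h1 : pvInfMin (pvTerm arr1 a2s fuel (k, c')) (pvTerm arr1 a2s fuel (k, c))
          = pvTerm arr1 a2s fuel (k, c) := by
        rw [pvInfMin_comm]
        exact pvInfMin_eq_left (pvOle_map_add_of_le c c' hcc _)
      conv_rhs => rw [pvInfMin_assoc,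
        pvInfMin_comm (pvMinList (t.map (pvTerm arr1 a2s fuel))) (pvTerm arr1 a2s fuel (k, c)),
        ← pvInfMin_assoc, h1]
    · have hmem' : (k, c') ∈ t := by
        rcases List.mem_cons.mp hmem with h | h
        · exact absurd (congrArg Prod.fst h.symm) hpk
        · exact h
      have hif : (if p.1 == k then (k, c) else p) = p := by simp [hpk]
      rw [hif]
      simp only [pvMinList]
      rw [ih hnd.2 hmem', ← pvInfMin_assoc]

lemma pvVal_updMin (arr1 a2s : List Int) (fuel : Nat) (d : PySem.Dict Int Int)
    (hnd : d.keys.Nodup) (k c : Int) :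
    pvVal arr1 a2s fuel (pvUpdMin d k c).items
        = pvInfMin (pvVal arr1 a2s fuel d.items) (pvTerm arr1 a2s fuel (k, c)) ∧
      (pvUpdMin d k c).keys.Nodup := by
  cases hget : d.get? k with
  | none =>
    have hcont : d.contains k = false := by
      rw [PySem.Dict.contains_eq_isSome_get?, hget]
      rfl
    simp only [pvUpdMin, hget]
    constructor
    · rw [PySem.Dict.items_insert_of_not_contains d c hcont]
      unfold pvVal
      rw [List.map_append]
      induction (d.items.map (pvTerm arr1 a2s fuel)) with
      | nil => simp [pvMinList]
      | cons a s ihs => simp only [List.cons_append, pvMinList, ihs, pvInfMin_assoc]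
    · exact PySem.Dict.nodup_keys_insert d k c hnd
  | some c' =>
    by_cases hlt : c < c'
    · simp only [pvUpdMin, hget, if_pos hlt]
      have hcont : d.contains k = true := by
        rw [PySem.Dict.contains_eq_isSome_get?, hget]
        rfl
      constructor
      · rw [PySem.Dict.items_insert_of_contains d c hcont]
        exact pvVal_replace arr1 a2s fuel k c c' (le_of_lt hlt) d.items
          (by simpa [PySem.Dict.keys] using hnd)
          (PySem.Dict.mem_items_of_get?_eq_some d hget)
      · exact PySem.Dict.nodup_keys_insert d k c hnd
    · simp only [pvUpdMin, hget, if_neg hlt]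
      refine ⟨?_, hnd⟩
      unfold pvVal
      rw [pvInfMin_eq_left]
      apply pvOle_trans (pvOle_minList_mem
        (List.mem_map_of_mem (PySem.Dict.mem_items_of_get?_eq_some d hget)))
      exact pvOle_map_add_of_le c' c (by omega) _

lemma pvStep_fold (arr1 a2s : List Int) (fuel : Nat) (x : Int) :
    ∀ (L : List (Int × Int)) (new : PySem.Dict Int Int), new.keys.Nodup →
      pvVal arr1 a2s fuel (L.foldl (fun new lc =>
          (a2s[PySem.List.bisectRight a2s lc.1]?).elim
            (if lc.1 < x then pvUpdMin new x lc.2 else new)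
            (fun v => pvUpdMin (if lc.1 < x then pvUpdMin new x lc.2 else new) v (lc.2 + 1))) new).items
        = pvInfMin (pvVal arr1 a2s fuel new.items) (pvMinList (L.map (pvContrib arr1 a2s fuel x)))
      ∧ (L.foldl (fun new lc =>
          (a2s[PySem.List.bisectRight a2s lc.1]?).elim
            (if lc.1 < x then pvUpdMin new x lc.2 else new)
            (fun v => pvUpdMin (if lc.1 < x then pvUpdMin new x lc.2 else new) v (lc.2 + 1))) new).keys.Nodup := by
  intro L
  induction L with
  | nil => intro new hnd; exact ⟨by simp [pvMinList], hnd⟩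
  | cons lc t ih =>
    intro new hnd
    have hnew1 : pvVal arr1 a2s fuel (if lc.1 < x then pvUpdMin new x lc.2 else new).items
        = pvInfMin (pvVal arr1 a2s fuel new.items)
            (if lc.1 < x then (pvGB arr1 a2s fuel x).map (fun t => lc.2 + t) else none)
      ∧ (if lc.1 < x then pvUpdMin new x lc.2 else new).keys.Nodup := by
      by_cases h : lc.1 < x
      · rw [if_pos h, if_pos h]
        exact pvVal_updMin arr1 a2s fuel new hnd x lc.2
      · rw [if_neg h, if_neg h, pvInfMin_none_right]
        exact ⟨rfl, hnd⟩
    have hone : pvVal arr1 a2s fuel ((a2s[PySem.List.bisectRight a2s lc.1]?).elim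
            (if lc.1 < x then pvUpdMin new x lc.2 else new)
            (fun v => pvUpdMin (if lc.1 < x then pvUpdMin new x lc.2 else new) v (lc.2 + 1))).items
          = pvInfMin (pvVal arr1 a2s fuel new.items) (pvContrib arr1 a2s fuel x lc)
        ∧ ((a2s[PySem.List.bisectRight a2s lc.1]?).elim
            (if lc.1 < x then pvUpdMin new x lc.2 else new)
            (fun v => pvUpdMin (if lc.1 < x then pvUpdMin new x lc.2 else new) v (lc.2 + 1))).keys.Nodup := by
      unfold pvContrib
      cases hidx : a2s[PySem.List.bisectRight a2s lc.1]? with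
      | none =>
        simp only [Option.elim]
        rw [pvInfMin_none_right]
        exact hnew1
      | some v =>
        simp only [Option.elim]
        obtain ⟨hu1, hu2⟩ := pvVal_updMin arr1 a2s fuel _ hnew1.2 v (lc.2 + 1)
        refine ⟨?_, hu2⟩
        rw [hu1, hnew1.1, pvInfMin_assoc]
        rfl
    simp only [List.foldl_cons]
    obtain ⟨ht1, ht2⟩ := ih _ hone.2
    refine ⟨?_, ht2⟩
    rw [ht1, hone.1, List.map_cons]
    show pvInfMin (pvInfMin (pvVal arr1 a2s fuel new.items) (pvContrib arr1 a2s fuel x lc)) _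
        = pvInfMin (pvVal arr1 a2s fuel new.items) (pvInfMin (pvContrib arr1 a2s fuel x lc) _)
    rw [pvInfMin_assoc]

lemma pvInfMin_map_add (c : Int) (a b : Option Int) :
    (pvInfMin a b).map (fun t => c + t)
      = pvInfMin (a.map (fun t => c + t)) (b.map (fun t => c + t)) := by
  cases a with
  | none => cases b <;> rfl
  | some s =>
    cases b with
    | none => rfl
    | some u =>
      simp [pvInfMin]

lemma pvContrib_eq_term (arr1 a2s : List Int) (fuel : Nat) (lc : Int × Int) :
    pvContrib arr1 a2s fuel (pvX arr1 fuel) lc = pvTerm arr1 a2s (fuel+1) lc := by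
  unfold pvTerm pvContrib
  rw [pvGB, pvInfMin_map_add]
  congr 1
  · by_cases h : lc.1 < pvX arr1 fuel
    · rw [if_pos h, if_pos h]
    · rw [if_neg h, if_neg h]
      rfl
  · cases hidx : a2s[PySem.List.bisectRight a2s lc.1]? with
    | none => rfl
    | some v =>
      show (pvGB arr1 a2s fuel v).map (fun t => lc.2 + 1 + t)
          = ((pvGB arr1 a2s fuel v).map (fun t => 1 + t)).map (fun t => lc.2 + t)
      rw [Option.map_map]
      cases pvGB arr1 a2s fuel v with
      | none => rfl
      | some g =>
        simp

lemma pvVal_stepB (arr1 a2s : List Int) (fuel : Nat) (states : PySem.Dict Int Int)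
    (hnd : states.keys.Nodup) :
    pvVal arr1 a2s fuel (pvStepB a2s states (pvX arr1 fuel)).items
        = pvVal arr1 a2s (fuel+1) states.items ∧
      (pvStepB a2s states (pvX arr1 fuel)).keys.Nodup := by
  simp only [pvStepB]
  obtain ⟨h1, h2⟩ := pvStep_fold arr1 a2s fuel (pvX arr1 fuel) states.items PySem.Dict.empty
    (by simp [PySem.Dict.keys_empty])
  refine ⟨?_, h2⟩
  rw [h1]
  have hemp : pvVal arr1 a2s fuel (PySem.Dict.empty : PySem.Dict Int Int).items = none := rfl
  rw [hemp, pvInfMin_none_left]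
  unfold pvVal
  congr 1
  exact List.map_congr_left (fun lc _ => pvContrib_eq_term arr1 a2s fuel lc)

lemma pvGetD_append (pre : List Int) (x : Int) (t : List Int) :
    (pre ++ x :: t).getD pre.length 0 = x := by
  induction pre with
  | nil => rfl
  | cons a pre ih => simpa using ih

lemma pvFold_forward (arr1 a2s : List Int) :
    ∀ (rest pre : List Int) (states : PySem.Dict Int Int),
      arr1 = pre ++ rest → states.keys.Nodup →
      pvVal arr1 a2s 0 (rest.foldl (pvStepB a2s) states).items
        = pvVal arr1 a2s rest.length states.items := by
  intro rest
  induction rest with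
  | nil => intro pre states _ _; rfl
  | cons x t ih =>
    intro pre states harr hnd
    have hlen : arr1.length = pre.length + (t.length + 1) := by rw [harr]; simp
    have hx : pvX arr1 t.length = x := by
      unfold pvX
      rw [hlen, Nat.add_sub_cancel, harr]
      exact pvGetD_append pre x t
    obtain ⟨h1, h2⟩ := pvVal_stepB arr1 a2s t.length states hnd
    rw [hx] at h1 h2
    rw [List.foldl_cons, ih (pre ++ [x]) (pvStepB a2s states x) (by rw [harr]; simp) h2, h1]
    rfl

lemma pvFoldlMin_aux : ∀ (t : List Int) (a b : Int),
    t.foldl min (min a b) = min a (t.foldl min b) := by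
  intro t
  induction t with
  | nil => intro a b; rfl
  | cons c t ih =>
    intro a b
    simp only [List.foldl_cons]
    rw [min_assoc, ih]

lemma pvMinList_map_some : ∀ (v : Int) (t : List Int),
    pvMinList ((v :: t).map some) = some (t.foldl min v) := by
  intro v t
  induction t generalizing v with
  | nil => rfl
  | cons w t ih =>
    simp only [List.map_cons, pvMinList] at ih ⊢
    rw [ih w]
    show some (min v (t.foldl min w)) = some ((w :: t).foldl min v)
    simp only [List.foldl_cons]
    rw [← pvFoldlMin_aux]

lemma pvVal_zero (arr1 a2s : List Int) (L : List (Int × Int)) :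
    pvVal arr1 a2s 0 L = pvMinList (L.map (fun lc => some lc.2)) := by
  unfold pvVal
  congr 1
  apply List.map_congr_left
  intro lc _
  unfold pvTerm
  rw [pvGB]
  simp

lemma pvMin_eq (L : List (Int × Int)) :
    PySem.List.min? (L.map (fun p => p.2)) (fun y => y)
      = pvMinList (L.map (fun lc => some lc.2)) := by
  cases L with
  | nil => rfl
  | cons p t =>
    have h2 : (p :: t).map (fun lc => some lc.2) = (p.2 :: t.map (fun p => p.2)).map some := by
      simp [List.map_map, Function.comp]
    rw [h2, pvMinList_map_some]
    show PySem.List.min? (p.2 :: t.map (fun p => p.2)) (fun y => y) = _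
    rw [PySem.List.min?_id_cons]

-- ===== VERDICT (by name: the statement is the Claim_ definition above) =====
theorem make_array_strictly_increasing_basic_dp_spec : Claim_equal_make_array_strictly_increasing_basic_dp := by
  intro arr1 arr2 _hdom
  unfold Spec_make_array_strictly_increasing_basic_dp
  unfold make_array_strictly_increasing_basic_dp make_array_strictly_increasing_basic_dp_alt
  have hlt := PySem.List.sorted_ofList_pairwise_lt (κ := Int) arr2
  generalize ha2s : PySem.List.sorted (PySem.Set.ofList arr2) (fun x => x) false = a2s
  rw [ha2s] at hlt
  have hA : (pvSolveA arr1 a2s arr1.length (-1) PySem.Dict.empty).1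
      = pvFA arr1 a2s arr1.length (-1) := by
    refine (pvSolveA_correct arr1 a2s arr1.length (-1) PySem.Dict.empty (le_refl _) ?_).1
    intro k l v _ h
    rw [PySem.Dict.get?_empty] at h
    cases h
  have hinit : ((PySem.Dict.empty : PySem.Dict Int Int).insert (-1) 0).keys.Nodup := by decide
  have hB := pvFold_forward arr1 a2s arr1 []
    ((PySem.Dict.empty : PySem.Dict Int Int).insert (-1) 0) (by simp) hinit
  have hinititems : ((PySem.Dict.empty : PySem.Dict Int Int).insert (-1) 0).items
      = [((-1 : Int), (0 : Int))] := rfl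
  rw [hinititems] at hB
  have hinitval : pvVal arr1 a2s arr1.length [((-1 : Int), (0 : Int))]
      = pvGB arr1 a2s arr1.length (-1) := by
    unfold pvVal pvTerm
    simp only [List.map_cons, List.map_nil, pvMinList, pvInfMin_none_right]
    cases pvGB arr1 a2s arr1.length (-1) <;> simp
  rw [hinitval] at hB
  have hvals : ((arr1.foldl (pvStepB a2s) ((PySem.Dict.empty : PySem.Dict Int Int).insert (-1) 0)).values)
      = ((arr1.foldl (pvStepB a2s) ((PySem.Dict.empty : PySem.Dict Int Int).insert (-1) 0)).items.map (fun p => p.2)) := rfl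
  rw [hA, hvals, pvMin_eq, ← pvVal_zero arr1 a2s, hB, ← pvFA_eq_pvGB arr1 a2s hlt]
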